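-- pv_equiv track=rewrite | github.com/jeremyagray/elective | elective/env.py | _is_listdict
-- ===== SOURCE A (Python) =====
-- def _is_listdict(d):
--     """Determine if the keys of a dict are list indices."""
--     # All integers?
--     keys = []
--     for k in d.keys():
--         try:
--             keys.append(int(k))
--         except (ValueError):
--             return False
--
--     keys = sorted(keys)
--
--     # Zero start?
--     if min(keys) != 0:
--         return False
--
--     # Consecutive?
--     if keys != list(range(0, max(keys) + 1)):
--         return False
--
--     return True
-- ===== SOURCE B (Python) =====
-- def _is_listdict(d):
--     """Determine if the keys of a dict are list indices."""
--     n = len(d)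
--     seen = set()
--     for k in d.keys():
--         try:
--             v = int(k)
--         except ValueError:
--             return False
--         if 0 <= v < n:
--             seen.add(v)
--     return n > 0 and len(seen) == n
-- ===== Notes on version B (the rewrite author's own statement) =====
-- stated objective: alternative
-- what changed: B replaces A's sort of the parsed keys plus comparison against list(range(max+1)) by a single pass that collects the in-range parsed keys into a set and compares the set's size with the key count.
import Mathlib
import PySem

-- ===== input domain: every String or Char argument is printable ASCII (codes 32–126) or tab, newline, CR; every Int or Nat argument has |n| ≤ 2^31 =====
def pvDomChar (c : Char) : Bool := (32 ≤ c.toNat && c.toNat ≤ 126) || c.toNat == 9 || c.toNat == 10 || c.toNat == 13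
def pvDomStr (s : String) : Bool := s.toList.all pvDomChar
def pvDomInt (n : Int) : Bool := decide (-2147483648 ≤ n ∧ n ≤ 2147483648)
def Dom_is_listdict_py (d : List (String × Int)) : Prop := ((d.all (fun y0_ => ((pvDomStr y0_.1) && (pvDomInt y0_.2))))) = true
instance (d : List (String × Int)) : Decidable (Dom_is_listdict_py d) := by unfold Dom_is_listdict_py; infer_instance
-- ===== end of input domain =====

-- B replaces A's sort + range comparison by a single pass collecting the in-range keys
-- into a set and comparing its size with the key count.

-- ===== PORT A =====
-- the 'for k in d.keys(): keys.append(int(k))' loop with its early 'return False'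
def pvAParse : List String → List Int → Option (List Int)
  | [], acc => some acc
  | k :: ks, acc =>
    match PySem.Int.ofStr? k with
    | none => none
    | some v => pvAParse ks (acc ++ [v])

def is_listdict_py (d : List (String × Int)) : Bool :=
  match pvAParse (PySem.Dict.keys (PySem.Dict.ofList d)) [] with
  | none => false
  | some keys0 =>
    let keys := PySem.List.sorted keys0 (fun x => x) false
    match PySem.List.min? keys (fun x => x) with
    | none => false  -- Python raises ValueError here (min of empty sequence); excluded by Pre_
    | some m =>
      if m ≠ 0 then false
      else
        match PySem.List.max? keys (fun x => x) with
        | none => false  -- unreachable: min? succeeded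
        | some M =>
          if keys ≠ PySem.List.pyRange 0 (M + 1) 1 then false else true

-- ===== PORT B =====
-- B's loop: parse each key, add the in-range values to a set, early 'return False' on a bad key
def pvBLoop (n : Int) : List String → PySem.Set Int → Option (PySem.Set Int)
  | [], seen => some seen
  | k :: ks, seen =>
    match PySem.Int.ofStr? k with
    | none => none
    | some v => pvBLoop n ks (if 0 ≤ v ∧ v < n then PySem.Set.add seen v else seen)

def is_listdict_py_alt (d : List (String × Int)) : Bool :=
  let ks := PySem.Dict.keys (PySem.Dict.ofList d)
  let n : Int := PySem.List.len ks
  match pvBLoop n ks PySem.Set.empty with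
  | none => false
  | some seen => decide (0 < n) && (PySem.Set.len seen == n)

-- ===== PRECONDITION & SPEC =====
-- Pre_ excludes only the empty dict, on which A raises ValueError (min() of an empty sequence).
def Pre_is_listdict_py (d : List (String × Int)) : Prop := d ≠ []
instance (d : List (String × Int)) : Decidable (Pre_is_listdict_py d) := by unfold Pre_is_listdict_py; infer_instance
def pvWitness_is_listdict_py : (List (String × Int)) := [("0", 7), ("1", 8)]

def Spec_is_listdict_py (d : List (String × Int)) (out : Bool) : Prop := out = is_listdict_py_alt d
instance (d : List (String × Int)) (out : Bool) : Decidable (Spec_is_listdict_py d out) := by unfold Spec_is_listdict_py; infer_instance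

-- ===== CLAIM (what is proved, stated in full; the proofs are below) =====
def Claim_equal_is_listdict_py : Prop := ∀ (d : List (String × Int)), Dom_is_listdict_py d → Pre_is_listdict_py d → Spec_is_listdict_py d (is_listdict_py d)

-- ===== LEMMAS AND PROOFS =====

-- all-or-nothing parse of the key list, shared characterisation of both loops
def pvParseAll : List String → Option (List Int)
  | [] => some []
  | k :: ks =>
    match PySem.Int.ofStr? k with
    | none => none
    | some v => (pvParseAll ks).map (v :: ·)

theorem pvAParse_eq (ks : List String) (acc : List Int) :
    pvAParse ks acc = (pvParseAll ks).map (acc ++ ·) := by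
  induction ks generalizing acc with
  | nil => simp [pvAParse, pvParseAll]
  | cons k ks ih =>
    simp only [pvAParse, pvParseAll]
    cases PySem.Int.ofStr? k with
    | none => rfl
    | some v =>
      simp only [ih]
      cases pvParseAll ks <;> simp

theorem pvBLoop_eq (n : Int) (ks : List String) (seen : PySem.Set Int) :
    pvBLoop n ks seen = (pvParseAll ks).map
      (fun vs => vs.foldl (fun s v => if 0 ≤ v ∧ v < n then PySem.Set.add s v else s) seen) := by
  induction ks generalizing seen with
  | nil => simp [pvBLoop, pvParseAll]
  | cons k ks ih =>
    simp only [pvBLoop, pvParseAll]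
    cases PySem.Int.ofStr? k with
    | none => rfl
    | some v =>
      simp only [ih]
      cases pvParseAll ks <;> simp

theorem pvParseAll_length (ks : List String) (L : List Int) (h : pvParseAll ks = some L) :
    L.length = ks.length := by
  induction ks generalizing L with
  | nil => simp [pvParseAll] at h; simp [← h]
  | cons k ks ih =>
    simp only [pvParseAll] at h
    cases hk : PySem.Int.ofStr? k with
    | none => rw [hk] at h; exact absurd h (by simp)
    | some v =>
      rw [hk] at h
      cases hp : pvParseAll ks with
      | none => rw [hp] at h; exact absurd h (by simp)
      | some L' =>
        rw [hp] at h
        simp at h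
        simp [← h, ih L' hp]

-- A's checks succeed exactly on a permutation of range(len(L)) (nonempty)
theorem pvA_core (L : List Int) :
    (match PySem.List.min? (PySem.List.sorted L (fun x => x) false) (fun x => x) with
     | none => false
     | some m =>
       if m ≠ 0 then false
       else
         match PySem.List.max? (PySem.List.sorted L (fun x => x) false) (fun x => x) with
         | none => false
         | some M =>
           if PySem.List.sorted L (fun x => x) false ≠ PySem.List.pyRange 0 (M + 1) 1 then false
           else true) = true
    ↔ (L ≠ [] ∧ L.Perm (PySem.List.pyRange 0 (L.length : Int) 1)) := by
  set S := PySem.List.sorted L (fun x => x) false with hS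
  have hpermS : S.Perm L := PySem.List.sorted_perm L (fun x => x) false
  constructor
  · intro h
    cases hm : PySem.List.min? S (fun x => x) with
    | none => rw [hm] at h; simp at h
    | some m =>
      simp only [hm] at h
      by_cases hm0 : m = 0
      · rw [if_neg (by simp [hm0])] at h
        cases hM : PySem.List.max? S (fun x => x) with
        | none => simp only [hM] at h; exact absurd h (by simp)
        | some M =>
          simp only [hM] at h
          by_cases heq : S = PySem.List.pyRange 0 (M + 1) 1
          · have hMmem : M ∈ S := PySem.List.max?_mem hM
            have hM0 : (0:Int) ≤ M := by
              have := PySem.List.min?_isMin hm M hMmem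
              simpa [hm0] using this
            have hlenS : S.length = (M + 1).toNat := by
              rw [heq, PySem.List.length_pyRange_one]; omega
            have hlen := hpermS.length_eq
            have hlenL : (L.length : Int) = M + 1 := by omega
            have hne : L ≠ [] := by
              intro hnil
              have h0 : S.length = 0 := by rw [hnil] at hlen; simpa using hlen
              omega
            refine ⟨hne, ?_⟩
            rw [hlenL, ← heq]
            exact hpermS.symm
          · rw [if_pos heq] at h
            exact absurd h (by simp)
      · rw [if_pos hm0] at h
        exact absurd h (by simp)
  · rintro ⟨hne, hperm⟩
    have hpos : 0 < L.length := List.length_pos_iff.mpr hne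
    have hSR : S = PySem.List.pyRange 0 (L.length : Int) 1 :=
      PySem.List.sorted_eq_of_perm_of_pairwise_lt L (PySem.List.pyRange 0 (L.length : Int) 1)
        (fun x => x) hperm.symm (PySem.List.pairwise_lt_pyRange_one 0 (L.length : Int))
    have hcons : PySem.List.pyRange 0 (L.length : Int) 1
        = 0 :: PySem.List.pyRange 1 (L.length : Int) 1 :=
      PySem.List.pyRange_one_cons (by omega)
    set t := PySem.List.pyRange 1 (L.length : Int) 1 with ht
    have hbound : ∀ y ∈ t, 1 ≤ y ∧ y < (L.length : Int) := by
      intro y hy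
      rw [ht] at hy
      exact (PySem.List.mem_pyRange_one).mp hy
    have hmin : PySem.List.min? S (fun x => x) = some (t.foldl min 0) := by
      rw [hSR, hcons]; exact PySem.List.min?_id_cons 0 t
    have hmin0 : t.foldl min 0 = 0 := by
      have h1 := (PySem.List.foldl_min_le t 0).1
      rcases PySem.List.foldl_min_mem t 0 with h | h
      · exact h
      · have := hbound _ h
        omega
    have hmax : PySem.List.max? S (fun x => x) = some (t.foldl max 0) := by
      rw [hSR, hcons]; exact PySem.List.max?_id_cons 0 t
    have hmaxval : t.foldl max 0 = (L.length : Int) - 1 := by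
      have h1 := PySem.List.le_foldl_max t 0
      have hub : t.foldl max 0 < (L.length : Int) := by
        rcases PySem.List.foldl_max_mem t 0 with h | h
        · omega
        · have := hbound _ h
          omega
      by_cases h2 : L.length = 1
      · have htnil : t = [] := by
          rw [ht]; apply PySem.List.pyRange_one_eq_nil; omega
        rw [htnil]; simp; omega
      · have hmem : (L.length : Int) - 1 ∈ t := by
          rw [ht, PySem.List.mem_pyRange_one]; omega
        have := h1.2 _ hmem
        omega
    rw [hmin, hmax]
    simp only [hmin0, hmaxval]
    have h3 : (L.length : Int) - 1 + 1 = (L.length : Int) := by omega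
    rw [h3, ← hSR]
    simp

-- B's size check succeeds exactly on the same permutations
theorem pvB_core (L : List Int) (n : Int) (hn : n = (L.length : Int)) :
    ((decide (0 < n) && (PySem.Set.len (L.foldl
        (fun s v => if 0 ≤ v ∧ v < n then PySem.Set.add s v else s) PySem.Set.empty) == n)) = true)
    ↔ (L ≠ [] ∧ L.Perm (PySem.List.pyRange 0 (L.length : Int) 1)) := by
  have hfold : (L.foldl (fun s v => if 0 ≤ v ∧ v < n then PySem.Set.add s v else s) PySem.Set.empty)
      = PySem.Set.ofList (L.filter (fun v => decide (0 ≤ v ∧ v < n))) := by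
    rw [PySem.List.foldl_ite_eq_foldl_filter, PySem.Set.ofList_eq_foldl]; rfl
  rw [hfold]
  set F := L.filter (fun v => decide (0 ≤ v ∧ v < n)) with hF
  set R := PySem.List.pyRange 0 (L.length : Int) 1 with hR
  have hRlen : R.length = L.length := by
    rw [hR, PySem.List.length_pyRange_one]; omega
  simp only [Bool.and_eq_true, decide_eq_true_eq, beq_iff_eq, PySem.Set.len]
  constructor
  · rintro ⟨hpos, hlen⟩
    have hne : L ≠ [] := by cases L <;> simp_all
    refine ⟨hne, ?_⟩
    have h1 : (PySem.Set.ofList F).length = L.length := by omega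
    have h2 : (PySem.Set.ofList F).length ≤ F.length := PySem.Set.length_ofList_le F
    have h3 : F.length ≤ L.length := List.length_filter_le _ L
    have hsub : PySem.Set.ofList F ⊆ R := by
      intro x hx
      have hxF : x ∈ F := (PySem.Set.mem_ofList F x).mp hx
      have := List.of_mem_filter hxF
      simp only [decide_eq_true_eq] at this
      rw [hR, PySem.List.mem_pyRange_one]; omega
    have hperm1 : (PySem.Set.ofList F).Perm R :=
      (List.subperm_of_subset (PySem.Set.nodup_ofList F) hsub).perm_of_length_le (by omega)
    have hsub2 : R ⊆ L := by
      intro x hx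
      have : x ∈ F := (PySem.Set.mem_ofList F x).mp (hperm1.symm.subset hx)
      exact List.mem_of_mem_filter this
    have : R.Perm L :=
      (List.subperm_of_subset (by rw [hR]; exact PySem.List.nodup_pyRange_one 0 (L.length : Int)) hsub2).perm_of_length_le (by omega)
    exact this.symm
  · rintro ⟨hne, hperm⟩
    have hpos : 0 < L.length := List.length_pos_iff.mpr hne
    refine ⟨by omega, ?_⟩
    have hFL : F = L := by
      rw [hF]
      apply List.filter_eq_self.mpr
      intro x hx
      have := (PySem.List.mem_pyRange_one).mp (hperm.subset hx)
      simp only [decide_eq_true_eq]; omega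
    have hnd : L.Nodup := hperm.symm.nodup (by rw [hR]; exact PySem.List.nodup_pyRange_one 0 (L.length : Int))
    rw [hFL, PySem.Set.ofList_eq_self_of_nodup L hnd]
    omega

-- ===== VERDICT (by name: the statement is the Claim_ definition above) =====
theorem is_listdict_py_spec : Claim_equal_is_listdict_py := by
  intro d _ _
  unfold Spec_is_listdict_py is_listdict_py is_listdict_py_alt
  simp only [pvAParse_eq, pvBLoop_eq]
  cases hp : pvParseAll (PySem.Dict.keys (PySem.Dict.ofList d)) with
  | none => rfl
  | some L =>
    simp only [Option.map_some, List.nil_append]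
    have hlen : (PySem.List.len (PySem.Dict.keys (PySem.Dict.ofList d))) = (L.length : Int) := by
      simp [PySem.List.len_eq, pvParseAll_length _ _ hp]
    rw [Bool.eq_iff_iff, pvA_core, pvB_core L _ hlen]
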